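-- pv_equiv track=rewrite | github.com/polymath-raval/coursera-introduction-to-graphs | week2_decomposition2/3_strongly_connected/strongly_connected.py | computePostClock
-- ===== SOURCE A (Python) =====
-- def computePostClock(adj):
--     r_adj = reverse(adj)
--     visited = [False] * len(r_adj)
--     pre = [0] * len(r_adj)
--     post = [0] * len(r_adj)
--     clock = 0
--     for vertex in range(len(r_adj)):
--         clock = dfs(r_adj, visited, vertex, pre, post, clock)
--     return post
--
-- def reverse(adj):
--     reverse =  [[] for _ in range(len(adj))]
--     for vertex in range(len(adj)):
--         for neighbour in adj[vertex]:
--             reverse[neighbour].append(vertex)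
--     return reverse
--
-- def dfs(adj, visited, vertex, pre, post, clock):
--     if visited[vertex]:
--         return clock
--     else:
--         visited[vertex] = True
--         clock = clock + 1
--         pre[vertex] = clock
--         for neighbour in adj[vertex]:
--             clock = dfs(adj, visited, neighbour, pre, post, clock)
--         clock = clock + 1
--         post[vertex] = clock
--         return clock
-- ===== SOURCE B (Python) =====
-- def computePostClock(adj):
--     n = len(adj)
--     r_adj = [[] for _ in range(n)]
--     for v in range(n):
--         for nb in adj[v]:
--             r_adj[nb].append(v)
--     visited = [False] * n
--     post = [0] * n
--     clock = 0
--     for start in range(n):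
--         stack = [(start, False)]
--         while stack:
--             v, is_post = stack.pop()
--             if is_post:
--                 clock += 1
--                 post[v] = clock
--             elif not visited[v]:
--                 visited[v] = True
--                 clock += 1  # pre tick (pre numbers are not needed for the result)
--                 stack.append((v, True))
--                 for nb in reversed(r_adj[v]):
--                     stack.append((nb, False))
--     return post
-- ===== Notes on version B (the rewrite author's own statement) =====
-- stated objective: alternative
-- what changed: The recursive dfs (which ticks the clock on both pre and post) is replaced by an iterative stack machine with (vertex, post-marker) frames, pushing neighbours in reverse so they are processed left-to-right, and the dead pre array is dropped; reverse(adj) is kept unchanged.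
import Mathlib
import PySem

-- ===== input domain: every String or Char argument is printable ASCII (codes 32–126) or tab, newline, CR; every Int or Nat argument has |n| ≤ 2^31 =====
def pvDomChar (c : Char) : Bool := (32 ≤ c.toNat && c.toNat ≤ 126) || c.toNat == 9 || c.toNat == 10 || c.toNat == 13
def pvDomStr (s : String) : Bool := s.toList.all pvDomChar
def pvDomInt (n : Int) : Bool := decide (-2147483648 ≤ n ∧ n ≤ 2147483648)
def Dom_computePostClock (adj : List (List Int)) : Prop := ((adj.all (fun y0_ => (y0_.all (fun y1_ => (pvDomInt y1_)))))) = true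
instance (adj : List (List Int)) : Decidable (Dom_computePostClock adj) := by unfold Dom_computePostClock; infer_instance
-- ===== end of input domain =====

-- B replaces A's recursive dfs by an iterative stack machine with explicit post-markers
-- (same reverse-graph construction, same clock sequence, dead `pre` array dropped): a
-- different decomposition of the same O(n+E) traversal, not claimed faster.


-- ===== PORT A =====

-- reverse[neighbour].append(vertex); out-of-range neighbour is a no-op here (Python raises
-- IndexError there; such inputs are excluded by Pre_ below).
def pyAppendAt (r : List (List Int)) (i : Int) (x : Int) : List (List Int) :=
  PySem.List.pySetD r i (PySem.List.pyGetD r i [] ++ [x])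

-- the helper `reverse(adj)` (identical in Source A and Source B, so shared by both ports)
def revAdj (adj : List (List Int)) : List (List Int) :=
  (List.range adj.length).foldl
    (fun r v => (PySem.List.pyGetD adj (v : Int) []).foldl (fun r nb => pyAppendAt r nb (v : Int)) r)
    (List.replicate adj.length ([] : List Int))

structure StA where
  visited : List Bool
  pre : List Int
  post : List Int
  clock : Int
deriving Repr, DecidableEq

-- A's recursive dfs; fuel (visited.length + 1 at each call site) is only a totality guard:
-- inside Pre_ the recursion depth never reaches it (each nested genuine visit consumes an
-- unvisited vertex).  Out-of-range vertex (Python IndexError, outside Pre_) returns the state.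
def dfsA (g : List (List Int)) : Nat → Int → StA → StA
  | 0, _, st => st
  | f + 1, v, st =>
    match PySem.List.pyGet? st.visited v with
    | none => st
    | some true => st
    | some false =>
      let clock1 := st.clock + 1
      let st1 : StA := ⟨PySem.List.pySetD st.visited v true,
                        PySem.List.pySetD st.pre v clock1, st.post, clock1⟩
      let st2 := (PySem.List.pyGetD g v []).foldl (fun s nb => dfsA g f nb s) st1
      ⟨st2.visited, st2.pre, PySem.List.pySetD st2.post v (st2.clock + 1), st2.clock + 1⟩

def computePostClock (adj : List (List Int)) : List Int :=
  let r := revAdj adj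
  let n := r.length
  let st0 : StA := ⟨List.replicate n false, List.replicate n 0, List.replicate n 0, 0⟩
  ((List.range n).foldl (fun st (v : Nat) => dfsA r (st.visited.length + 1) (v : Int) st) st0).post

-- ===== PORT B =====

-- stack frames of Source B's `(vertex, is_post)` tuples
inductive BFrame where
  | visit : Int → BFrame
  | post : Int → BFrame
deriving Repr, DecidableEq

-- number of unvisited vertices (termination measure for the stack machine)
def cntF (l : List Bool) : Nat := l.count false

theorem count_set_true (l : List Bool) : ∀ (j : Nat), l[j]? = some false →
    (l.set j true).count false + 1 = l.count false := by
  induction l with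
  | nil => intro j h; simp at h
  | cons a t ih =>
    intro j h
    cases j with
    | zero =>
      simp only [List.getElem?_cons_zero, Option.some.injEq] at h
      subst h
      simp
    | succ j =>
      simp only [List.getElem?_cons_succ] at h
      simp only [List.set_cons_succ, List.count_cons]
      have := ih j h
      omega

theorem cnt_pySetD_true (vis : List Bool) (v : Int)
    (h : PySem.List.pyGet? vis v = some false) :
    cntF (PySem.List.pySetD vis v true) + 1 = cntF vis := by
  unfold cntF
  cases hk : PySem.List.pyIdx? vis.length v with
  | none => rw [PySem.List.pyGet?, hk] at h; simp at h
  | some k =>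
    rw [PySem.List.pyGet?, hk] at h
    simp only [Option.bind_some] at h
    simp only [PySem.List.pySetD, PySem.List.pySet?, hk, Option.map_some, Option.getD_some]
    exact count_set_true vis k h

-- Source B's while-loop: the stack is represented top-first, so pushing `reversed(r_adj[v])`
-- element by element (top of stack = first neighbour) is `nbrs.map visit ++ post v :: S`.
-- Out-of-range vertex (Python IndexError, outside Pre_) is skipped.
def loopB (g : List (List Int)) (S : List BFrame) (vis : List Bool) (post : List Int)
    (clock : Int) : List Bool × List Int × Int :=
  match S with
  | [] => (vis, post, clock)
  | BFrame.post v :: S' => loopB g S' vis (PySem.List.pySetD post v (clock + 1)) (clock + 1)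
  | BFrame.visit v :: S' =>
    match h : PySem.List.pyGet? vis v with
    | none => loopB g S' vis post clock
    | some true => loopB g S' vis post clock
    | some false =>
      loopB g ((PySem.List.pyGetD g v []).map BFrame.visit ++ BFrame.post v :: S')
        (PySem.List.pySetD vis v true) post (clock + 1)
termination_by (cntF vis, S.length)
decreasing_by
  · exact Prod.Lex.right _ (by simp)
  · exact Prod.Lex.right _ (by simp)
  · exact Prod.Lex.right _ (by simp)
  · exact Prod.Lex.left _ _ (by have := cnt_pySetD_true vis v h; omega)

def computePostClock_alt (adj : List (List Int)) : List Int :=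
  let r := revAdj adj
  let n := r.length
  let fin := (List.range n).foldl
    (fun (b : List Bool × List Int × Int) (s : Nat) => loopB r [BFrame.visit (s : Int)] b.1 b.2.1 b.2.2)
    (List.replicate n false, List.replicate n 0, (0 : Int))
  fin.2.1

-- ===== PRECONDITION & SPEC =====
-- Pre_ excludes exactly the inputs where the Python A raises IndexError: a neighbour index
-- outside [-n, n) (negative in-range indices wrap in Python and are kept inside Pre_).
def Pre_computePostClock (adj : List (List Int)) : Prop :=
  ∀ l ∈ adj, ∀ i ∈ l, PySem.Raise.InRange adj.length i
instance (adj : List (List Int)) : Decidable (Pre_computePostClock adj) := by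
  unfold Pre_computePostClock; infer_instance

def pvWitness_computePostClock : List (List Int) := [[1], [0], [0, 1]]

def Spec_computePostClock (adj : List (List Int)) (out : List Int) : Prop :=
  out = computePostClock_alt adj
instance (adj : List (List Int)) (out : List Int) : Decidable (Spec_computePostClock adj out) := by
  unfold Spec_computePostClock; infer_instance

-- ===== CLAIM (what is proved, stated in full; the proofs are below) =====
def Claim_equal_computePostClock : Prop := ∀ (adj : List (List Int)), Dom_computePostClock adj → Pre_computePostClock adj → Spec_computePostClock adj (computePostClock adj)

-- ===== LEMMAS AND PROOFS =====

theorem loopB_nil (g : List (List Int)) (vis : List Bool) (post : List Int) (clock : Int) :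
    loopB g [] vis post clock = (vis, post, clock) := by
  rw [loopB]

theorem loopB_post (g : List (List Int)) (v : Int) (S : List BFrame) (vis : List Bool)
    (post : List Int) (clock : Int) :
    loopB g (BFrame.post v :: S) vis post clock
      = loopB g S vis (PySem.List.pySetD post v (clock + 1)) (clock + 1) := by
  rw [loopB]

theorem pyGet?_some_false_cnt_pos (vis : List Bool) (v : Int)
    (h : PySem.List.pyGet? vis v = some false) : 0 < cntF vis := by
  have := cnt_pySetD_true vis v h
  omega

theorem foldl_dfsA_cnt_le (g : List (List Int)) (f : Nat)
    (ih : ∀ (v : Int) (st : StA), cntF (dfsA g f v st).visited ≤ cntF st.visited) :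
    ∀ (ns : List Int) (st : StA),
      cntF ((ns.foldl (fun s nb => dfsA g f nb s) st).visited) ≤ cntF st.visited := by
  intro ns
  induction ns with
  | nil => intro st; simp
  | cons a ns ihn =>
    intro st
    simp only [List.foldl_cons]
    exact le_trans (ihn (dfsA g f a st)) (ih a st)

theorem dfsA_cnt_le (g : List (List Int)) :
    ∀ (f : Nat) (v : Int) (st : StA), cntF (dfsA g f v st).visited ≤ cntF st.visited := by
  intro f
  induction f with
  | zero => intro v st; simp [dfsA]
  | succ f ih =>
    intro v st
    rw [dfsA]
    cases h : PySem.List.pyGet? st.visited v with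
    | none => simp
    | some b =>
      cases b with
      | true => simp
      | false =>
        simp only []
        have h1 := cnt_pySetD_true st.visited v h
        have h2 := foldl_dfsA_cnt_le g f ih (PySem.List.pyGetD g v [])
          ⟨PySem.List.pySetD st.visited v true,
           PySem.List.pySetD st.pre v (st.clock + 1), st.post, st.clock + 1⟩
        simp only [] at h2
        omega

-- simulation of one dfs call's neighbour loop by the stack machine
theorem sim_fold (g : List (List Int)) (f : Nat)
    (IH : ∀ (st : StA) (v : Int) (S : List BFrame), cntF st.visited < f →
      loopB g (BFrame.visit v :: S) st.visited st.post st.clock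
        = loopB g S (dfsA g f v st).visited (dfsA g f v st).post (dfsA g f v st).clock) :
    ∀ (ns : List Int) (st : StA) (S : List BFrame), cntF st.visited < f →
      loopB g (ns.map BFrame.visit ++ S) st.visited st.post st.clock
        = loopB g S ((ns.foldl (fun s nb => dfsA g f nb s) st).visited)
            ((ns.foldl (fun s nb => dfsA g f nb s) st).post)
            ((ns.foldl (fun s nb => dfsA g f nb s) st).clock) := by
  intro ns
  induction ns with
  | nil => intro st S h; simp
  | cons a ns ihn =>
    intro st S h
    simp only [List.map_cons, List.cons_append, List.foldl_cons]
    rw [IH st a _ h]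
    exact ihn (dfsA g f a st) S (lt_of_le_of_lt (dfsA_cnt_le g f a st) h)

-- main simulation: one recursive dfs call = the stack machine run on a pushed visit frame
theorem sim (g : List (List Int)) :
    ∀ (f : Nat) (st : StA) (v : Int) (S : List BFrame), cntF st.visited < f →
      loopB g (BFrame.visit v :: S) st.visited st.post st.clock
        = loopB g S (dfsA g f v st).visited (dfsA g f v st).post (dfsA g f v st).clock := by
  intro f
  induction f with
  | zero => intro st v S h; omega
  | succ f ih =>
    intro st v S h
    rw [dfsA, loopB]
    cases hg : PySem.List.pyGet? st.visited v with
    | none => simp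
    | some b =>
      cases b with
      | true => simp
      | false =>
        simp only []
        have hpos := pyGet?_some_false_cnt_pos st.visited v hg
        have hcnt := cnt_pySetD_true st.visited v hg
        set st1 : StA := ⟨PySem.List.pySetD st.visited v true,
          PySem.List.pySetD st.pre v (st.clock + 1), st.post, st.clock + 1⟩ with hst1
        have h1 : cntF st1.visited < f := by
          simp only [hst1]
          omega
        have := sim_fold g f ih (PySem.List.pyGetD g v []) st1 (BFrame.post v :: S) h1
        simp only [hst1] at this
        rw [this]
        rw [loopB_post]

-- the two top-level loops over range(n) stay in lockstep
theorem sim_top (g : List (List Int)) :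
    ∀ (L : List Nat) (vis : List Bool) (pre post : List Int) (clock : Int),
      L.foldl (fun (b : List Bool × List Int × Int) (s : Nat) =>
          loopB g [BFrame.visit (s : Int)] b.1 b.2.1 b.2.2) (vis, post, clock)
        = ((L.foldl (fun st (v : Nat) => dfsA g (st.visited.length + 1) (v : Int) st)
              (⟨vis, pre, post, clock⟩ : StA)).visited,
           (L.foldl (fun st (v : Nat) => dfsA g (st.visited.length + 1) (v : Int) st)
              (⟨vis, pre, post, clock⟩ : StA)).post,
           (L.foldl (fun st (v : Nat) => dfsA g (st.visited.length + 1) (v : Int) st)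
              (⟨vis, pre, post, clock⟩ : StA)).clock) := by
  intro L
  induction L with
  | nil => intro vis pre post clock; simp
  | cons a L ihl =>
    intro vis pre post clock
    simp only [List.foldl_cons]
    have hf : cntF vis < vis.length + 1 := Nat.lt_succ_of_le (List.count_le_length)
    have h1 := sim g (vis.length + 1) ⟨vis, pre, post, clock⟩ (a : Int) [] hf
    simp only [loopB_nil] at h1
    rw [h1]
    set st' := dfsA g (vis.length + 1) (a : Int) (⟨vis, pre, post, clock⟩ : StA) with hst'
    have h2 := ihl st'.visited st'.pre st'.post st'.clock
    simp only at h2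
    rw [h2]

-- ===== VERDICT (by name: the statement is the Claim_ definition above) =====
theorem computePostClock_spec : Claim_equal_computePostClock := by
  intro adj _ _
  simp only [Spec_computePostClock, computePostClock, computePostClock_alt]
  rw [sim_top (revAdj adj) (List.range (revAdj adj).length)
    (List.replicate (revAdj adj).length false) (List.replicate (revAdj adj).length 0)
    (List.replicate (revAdj adj).length 0) 0]
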